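-- pv_equiv track=rewrite | github.com/vamsikrishna07/Amazon-OA | getMininumOfMaximumParcels.py | getMinimumOfMaxParcels
-- ===== SOURCE A (Python) =====
-- def getMinimumOfMaxParcels( parcels, extra_parcels ):
--     n, m, curr, res = len(parcels), max(parcels), 0, 0
--     for each in parcels:
--         curr += (m-each)
--     rem = extra_parcels - curr
--     if rem <= 0:
--         return m
--     else:
--         if rem % n == 0:
--             res = m + ( rem // n )
--         else:
--             res = m + ( rem // n )  + 1
--         return res
-- ===== SOURCE B (Python) =====
-- def getMinimumOfMaxParcels(parcels, extra_parcels):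
--     # Binary search: the answer is the smallest capacity x >= max(parcels)
--     # with n*x >= sum(parcels) + extra_parcels (all parcels plus extras fit
--     # when every slot is raised to x).
--     n = len(parcels)
--     total = sum(parcels) + extra_parcels
--     lo = max(parcels)
--     hi = lo + max(extra_parcels, 0)
--     while lo < hi:
--         mid = (lo + hi) // 2
--         if n * mid >= total:
--             hi = mid
--         else:
--             lo = mid + 1
--     return lo
-- ===== Notes on version B (the rewrite author's own statement) =====
-- stated objective: alternative
-- what changed: Replaced A's deficit-accumulation loop plus modulo/branch arithmetic with a binary search for the smallest feasible maximum x with n*x >= sum(parcels)+extra_parcels over [max(parcels), max(parcels)+max(extra,0)]; the per-element work drops to builtin sum/max passes.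
import Mathlib
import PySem

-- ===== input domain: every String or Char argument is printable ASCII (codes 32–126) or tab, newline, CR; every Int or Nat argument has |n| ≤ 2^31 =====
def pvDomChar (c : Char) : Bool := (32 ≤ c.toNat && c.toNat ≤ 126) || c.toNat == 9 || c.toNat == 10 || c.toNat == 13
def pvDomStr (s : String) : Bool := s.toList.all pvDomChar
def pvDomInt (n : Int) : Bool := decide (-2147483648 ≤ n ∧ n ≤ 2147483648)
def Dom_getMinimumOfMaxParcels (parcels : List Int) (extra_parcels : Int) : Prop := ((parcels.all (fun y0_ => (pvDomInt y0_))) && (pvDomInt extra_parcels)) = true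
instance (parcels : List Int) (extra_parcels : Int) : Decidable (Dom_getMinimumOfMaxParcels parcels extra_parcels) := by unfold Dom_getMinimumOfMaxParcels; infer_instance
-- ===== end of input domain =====

-- B replaces A's deficit loop + modulo branch by a binary search for the
-- smallest feasible maximum (an alternative algorithm, not claimed faster).

-- ===== PORT A =====
def getMinimumOfMaxParcels (parcels : List Int) (extra_parcels : Int) : Int :=
  let n : Int := parcels.length
  let m : Int := ((PySem.List.max? parcels (fun x => x)).getD 0)  -- max([]) raises: Pre_ excludes []
  let curr : Int := parcels.foldl (fun acc each => acc + (m - each)) 0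
  let rem : Int := extra_parcels - curr
  if rem ≤ 0 then m
  else if PySem.Int.mod rem n = 0 then m + PySem.Int.floordiv rem n
  else m + PySem.Int.floordiv rem n + 1

-- ===== PORT B =====
-- the while loop of Source B, recursion on hi - lo
def pvBSearch (n total lo hi : Int) : Int :=
  if h : lo < hi then
    let mid := PySem.Int.floordiv (lo + hi) 2
    if n * mid ≥ total then pvBSearch n total lo mid
    else pvBSearch n total (mid + 1) hi
  else lo
termination_by (hi - lo).toNat
decreasing_by
  · have hb := (PySem.Int.floordiv_eq_iff_of_pos (by norm_num : (0:Int) < 2)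
      (a := lo + hi) (q := PySem.Int.floordiv (lo + hi) 2)).mp rfl
    omega
  · have hb := (PySem.Int.floordiv_eq_iff_of_pos (by norm_num : (0:Int) < 2)
      (a := lo + hi) (q := PySem.Int.floordiv (lo + hi) 2)).mp rfl
    omega

def getMinimumOfMaxParcels_alt (parcels : List Int) (extra_parcels : Int) : Int :=
  let n : Int := parcels.length
  let total : Int := parcels.sum + extra_parcels
  let lo : Int := ((PySem.List.max? parcels (fun x => x)).getD 0)  -- max([]) raises: Pre_ excludes []
  let hi : Int := lo + max extra_parcels 0
  pvBSearch n total lo hi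

-- ===== PRECONDITION & SPEC =====
-- Pre_ excludes only the empty list, on which both Pythons raise ValueError via max([]).
def Pre_getMinimumOfMaxParcels (parcels : List Int) (extra_parcels : Int) : Prop := parcels ≠ []
instance (parcels : List Int) (extra_parcels : Int) : Decidable (Pre_getMinimumOfMaxParcels parcels extra_parcels) := by unfold Pre_getMinimumOfMaxParcels; infer_instance
def pvWitness_getMinimumOfMaxParcels : List Int × Int := ([3, 1, 2], 5)

def Spec_getMinimumOfMaxParcels (parcels : List Int) (extra_parcels : Int) (out : Int) : Prop := out = getMinimumOfMaxParcels_alt parcels extra_parcels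
instance (parcels : List Int) (extra_parcels : Int) (out : Int) : Decidable (Spec_getMinimumOfMaxParcels parcels extra_parcels out) := by unfold Spec_getMinimumOfMaxParcels; infer_instance

-- ===== CLAIM =====
def Claim_equal_getMinimumOfMaxParcels : Prop := ∀ (parcels : List Int) (extra_parcels : Int), Dom_getMinimumOfMaxParcels parcels extra_parcels → Pre_getMinimumOfMaxParcels parcels extra_parcels → Spec_getMinimumOfMaxParcels parcels extra_parcels (getMinimumOfMaxParcels parcels extra_parcels)

-- ===== LEMMAS AND PROOFS =====

-- A's accumulation loop computes n*m - sum.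
theorem pv_curr_eq (m : Int) (xs : List Int) (acc : Int) :
    xs.foldl (fun acc each => acc + (m - each)) acc = acc + xs.length * m - xs.sum := by
  induction xs generalizing acc with
  | nil => simp
  | cons x t ih => simp [List.foldl_cons, ih]; ring

-- every element is ≤ the running max, so the sum is ≤ n * m
theorem pv_sum_le_aux (xs : List Int) (m : Int) (h : ∀ y ∈ xs, y ≤ m) :
    xs.sum ≤ xs.length * m := by
  induction xs with
  | nil => simp
  | cons x t ih =>
    have hx := h x (by simp)
    have ht := ih (fun y hy => h y (by simp [hy]))
    simp only [List.sum_cons, List.length_cons]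
    push_cast
    nlinarith

theorem pv_sum_le (xs : List Int) (m : Int) (hne : xs ≠ [])
    (hm : (PySem.List.max? xs (fun x => x)).getD 0 = m) : xs.sum ≤ xs.length * m := by
  obtain ⟨v, hv⟩ := Option.ne_none_iff_exists'.mp
    (fun h => hne ((PySem.List.max?_eq_none_iff (xs := xs) (key := fun x : Int => x)).mp h))
  refine pv_sum_le_aux xs m (fun y hy => ?_)
  have := PySem.List.max?_isMax hv y hy
  simpa [hv, ← hm] using this

-- binary search finds r, the least feasible value ≥ lo
theorem pv_bsearch_eq (n total : Int) (hn : 0 < n) (r : Int) :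
    ∀ lo hi : Int, lo ≤ r → r ≤ hi → n * r ≥ total → (r = lo ∨ n * (r - 1) < total) →
      pvBSearch n total lo hi = r := by
  intro lo hi
  induction hfuel : (hi - lo).toNat using Nat.strong_induction_on generalizing lo hi with
  | _ k ih =>
  intro hlor hrhi hfeas hleast
  rw [pvBSearch]
  by_cases h1 : lo < hi
  · have hb := (PySem.Int.floordiv_eq_iff_of_pos (by norm_num : (0:Int) < 2)
      (a := lo + hi) (q := PySem.Int.floordiv (lo + hi) 2)).mp rfl
    set mid := PySem.Int.floordiv (lo + hi) 2 with hmid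
    simp only [dif_pos h1]
    by_cases h2 : n * mid ≥ total
    · rw [if_pos h2]
      have hrm : r ≤ mid := by
        rcases hleast with h | h
        · omega
        · nlinarith
      exact ih _ (by omega) lo mid rfl hlor hrm hfeas hleast
    · rw [if_neg h2]
      push_neg at h2
      have hmr : mid + 1 ≤ r := by nlinarith
      have hleast' : r = mid + 1 ∨ n * (r - 1) < total := by
        rcases hleast with h | h
        · omega
        · exact Or.inr h
      exact ih _ (by omega) (mid + 1) hi rfl hmr hrhi hfeas hleast'
  · simp only [dif_neg h1]
    omega

-- ===== VERDICT =====
theorem getMinimumOfMaxParcels_spec : Claim_equal_getMinimumOfMaxParcels := by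
  intro parcels extra _dom hpre
  unfold Spec_getMinimumOfMaxParcels getMinimumOfMaxParcels getMinimumOfMaxParcels_alt
  simp only [pv_curr_eq]
  set n : Int := (parcels.length : Int) with hn
  have hnpos : 0 < n := by
    have : parcels.length ≠ 0 := fun h => hpre (List.eq_nil_of_length_eq_zero h)
    omega
  set m : Int := ((PySem.List.max? parcels (fun x => x)).getD 0) with hm
  set s : Int := parcels.sum with hs
  have hsle : s ≤ n * m := by
    simpa [hn, hs] using pv_sum_le parcels m hpre hm.symm
  set rem : Int := extra - (0 + n * m - s) with hrem
  set total : Int := s + extra with htotal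
  set hi : Int := m + max extra 0 with hhi
  have htr : total = n * m + rem := by rw [htotal, hrem]; ring
  set q : Int := PySem.Int.floordiv rem n with hq
  have hqb : q * n ≤ rem ∧ rem < (q + 1) * n :=
    (PySem.Int.floordiv_eq_iff_of_pos hnpos).mp rfl
  have hmodd : q * n + PySem.Int.mod rem n = rem := PySem.Int.floordiv_mul_add_mod rem n
  have hremle : rem ≤ extra := by omega
  by_cases h1 : rem ≤ 0
  · -- A returns m
    rw [if_pos h1]
    exact (pv_bsearch_eq n total hnpos m m hi le_rfl (by omega)
      (by nlinarith) (Or.inl rfl)).symm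
  · rw [not_le] at h1
    by_cases h2 : PySem.Int.mod rem n = 0
    · have hremq : rem = q * n := by omega
      have hqpos : 1 ≤ q := by nlinarith
      rw [if_neg (not_le.mpr h1), if_pos h2]
      refine (pv_bsearch_eq n total hnpos (m + q) m hi (by omega) ?_
        (by nlinarith) (Or.inr (by nlinarith))).symm
      have : q ≤ rem := by nlinarith
      omega
    · have hmodpos : 0 < PySem.Int.mod rem n := by
        have h3 := PySem.Int.mod_eq_emod_of_pos hnpos (a := rem)
        have h4 := Int.emod_nonneg rem (by omega : n ≠ 0)
        omega
      have hmodlt : PySem.Int.mod rem n < n := by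
        have h3 := PySem.Int.mod_eq_emod_of_pos hnpos (a := rem)
        have h4 := Int.emod_lt_of_pos rem hnpos
        omega
      have hqnn : 0 ≤ q := by nlinarith
      rw [if_neg (not_le.mpr h1), if_neg h2]
      refine (pv_bsearch_eq n total hnpos (m + q + 1) m hi (by omega) ?_
        (by nlinarith) (Or.inr (by nlinarith))).symm
      have : q + 1 ≤ rem := by nlinarith
      omega
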